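-- pv_equiv track=rewrite | github.com/liuzihau/pg_grpo | data.py | _to_user_terminal_history
-- ===== SOURCE A (Python) =====
-- from typing import List, Dict, Optional, Any, Iterable
--
-- def _to_user_terminal_history(msgs: List[Dict[str, str]], keep_history: bool = True) -> Optional[List[Dict[str, str]]]:
--     """
--     Ensure the conversation we keep ends on a USER turn.
--     - If the last message is 'assistant', drop trailing assistant turns until the last 'user'.
--     - If there is no user at all, return None (skip sample).
--     - If keep_history=False, only keep the last user message (drop previous turns).
--     """
--     # Find the last user index
--     last_user_idx = None
--     for i in range(len(msgs) - 1, -1, -1):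
--         if msgs[i].get("role") == "user":
--             last_user_idx = i
--             break
--     if last_user_idx is None:
--         return None  # no user; skip
--
--     # Truncate everything after the last user turn
--     msgs = msgs[: last_user_idx + 1]
--
--     # Optionally keep only the last user turn
--     if not keep_history:
--         msgs = [msgs[-1]]
--
--     return msgs
-- ===== SOURCE B (Python) =====
-- from typing import List, Dict, Optional
--
--
-- def _to_user_terminal_history(msgs: List[Dict[str, str]], keep_history: bool = True) -> Optional[List[Dict[str, str]]]:
--     # Shallow copy so the caller's list is never mutated, then pop trailing
--     # non-user turns off the tail until a user turn (or nothing) remains.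
--     copy = list(msgs)
--     while copy and copy[-1].get("role") != "user":
--         copy.pop()
--     if not copy:
--         return None
--     if not keep_history:
--         return [copy[-1]]
--     return copy
-- ===== Notes on version B (the rewrite author's own statement) =====
-- stated objective: simpler
-- what changed: Instead of scanning indices backwards to locate the last user turn and then slicing (and indexing msgs[-1] again), B keeps a shrinking copy of the list and pops trailing non-user turns off the tail until a user turn remains.
import Mathlib
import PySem

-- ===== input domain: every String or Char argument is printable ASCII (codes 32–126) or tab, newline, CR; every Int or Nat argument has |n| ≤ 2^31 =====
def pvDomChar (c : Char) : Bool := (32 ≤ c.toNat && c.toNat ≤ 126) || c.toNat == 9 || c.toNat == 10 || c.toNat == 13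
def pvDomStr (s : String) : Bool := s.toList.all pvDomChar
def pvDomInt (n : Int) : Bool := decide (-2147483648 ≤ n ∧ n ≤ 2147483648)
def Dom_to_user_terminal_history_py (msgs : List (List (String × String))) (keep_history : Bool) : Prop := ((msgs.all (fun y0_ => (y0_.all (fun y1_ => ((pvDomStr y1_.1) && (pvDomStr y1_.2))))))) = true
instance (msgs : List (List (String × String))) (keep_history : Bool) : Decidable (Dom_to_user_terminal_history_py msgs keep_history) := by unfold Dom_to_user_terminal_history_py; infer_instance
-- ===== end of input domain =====

-- ===== PORT A =====
-- B changes the decomposition: pop trailing non-user turns from a copy instead of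
-- locating the last user index and slicing (objective: simpler; same O(n) cost;
-- neither version mutates the caller's list).
-- A's backwards scan `for i in range(len(msgs)-1,-1,-1): if msgs[i].get("role")=="user": break`.
-- Indices drawn from the range are always in bounds, so msgs[i] is ported with pyGetD
-- (the default [] is never consulted; this is exact on every reachable index).
def pvA_findLast (msgs : List (List (String × String))) : List Int → Option Int
  | [] => none
  | i :: rest =>
    if (PySem.Dict.mk (PySem.List.pyGetD msgs i [])).get? "role" == some "user" then some i
    else pvA_findLast msgs rest

def to_user_terminal_history_py (msgs : List (List (String × String))) (keep_history : Bool) : Option (List (List (String × String))) :=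
  match pvA_findLast msgs (PySem.List.pyRange ((msgs.length : Int) - 1) (-1) (-1)) with
  | none => none
  | some last_user_idx =>
    -- msgs = msgs[: last_user_idx + 1]
    let msgs' := PySem.List.slice msgs none (some (last_user_idx + 1))
    if !keep_history then
      -- msgs = [msgs[-1]]  (msgs' is nonempty here, so the none branch is unreachable)
      match PySem.List.pyGet? msgs' (-1) with
      | some m => some [m]
      | none => none
    else some msgs'

-- ===== PORT B =====
-- `while copy and copy[-1].get("role") != "user": copy.pop()`
def pvB_trim (l : List (List (String × String))) : List (List (String × String)) :=
  if h : l = [] then l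
  else if (PySem.Dict.mk (l.getLast h)).get? "role" == some "user" then l
  else pvB_trim l.dropLast
termination_by l.length
decreasing_by have := List.length_pos_of_ne_nil h; simp [List.length_dropLast]; omega

def to_user_terminal_history_py_alt (msgs : List (List (String × String))) (keep_history : Bool) : Option (List (List (String × String))) :=
  let copy := pvB_trim msgs
  if copy.isEmpty then none
  else if !keep_history then
    match PySem.List.pyGet? copy (-1) with
    | some m => some [m]
    | none => none
  else some copy

-- ===== PRECONDITION & SPEC =====
def Spec_to_user_terminal_history_py (msgs : List (List (String × String))) (keep_history : Bool) (out : Option (List (List (String × String)))) : Prop := out = to_user_terminal_history_py_alt msgs keep_history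
instance (msgs : List (List (String × String))) (keep_history : Bool) (out : Option (List (List (String × String)))) : Decidable (Spec_to_user_terminal_history_py msgs keep_history out) := by unfold Spec_to_user_terminal_history_py; infer_instance

-- ===== CLAIM (what is proved, stated in full; the proofs are below) =====
def Claim_equal_to_user_terminal_history_py : Prop := ∀ (msgs : List (List (String × String))) (keep_history : Bool), Dom_to_user_terminal_history_py msgs keep_history → Spec_to_user_terminal_history_py msgs keep_history (to_user_terminal_history_py msgs keep_history)

-- ===== LEMMAS AND PROOFS =====

theorem pvA_findLast_mem {msgs : List (List (String × String))} {idxs : List Int} {i : Int}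
    (h : pvA_findLast msgs idxs = some i) : i ∈ idxs := by
  induction idxs with
  | nil => simp [pvA_findLast] at h
  | cons j rest ih =>
    rw [pvA_findLast] at h
    split at h
    · simp_all
    · exact List.mem_cons_of_mem _ (ih h)

theorem pvA_findLast_append {l : List (List (String × String))} {m : List (String × String)}
    {idxs : List Int} (h : ∀ i ∈ idxs, 0 ≤ i ∧ i < (l.length : Int)) :
    pvA_findLast (l ++ [m]) idxs = pvA_findLast l idxs := by
  induction idxs with
  | nil => rfl
  | cons j rest ih =>
    have hj := h j (List.mem_cons_self ..)
    have hget : PySem.List.pyGetD (l ++ [m]) j ([] : List (String × String))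
        = PySem.List.pyGetD l j [] := by
      rw [PySem.List.pyGetD_of_nonneg _ _ hj.1, PySem.List.pyGetD_of_nonneg _ _ hj.1]
      have : j.toNat < l.length := by omega
      simp [List.getD, List.getElem?_append_left this]
    rw [pvA_findLast, pvA_findLast, hget]
    split
    · rfl
    · exact ih (fun i hi => h i (List.mem_cons_of_mem _ hi))

theorem pvB_trim_append_user {l : List (List (String × String))} {m : List (String × String)}
    (h : ((PySem.Dict.mk m).get? "role" == some "user") = true) :
    pvB_trim (l ++ [m]) = l ++ [m] := by
  rw [pvB_trim.eq_def]
  simp [h]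

theorem pvB_trim_append_not {l : List (List (String × String))} {m : List (String × String)}
    (h : ((PySem.Dict.mk m).get? "role" == some "user") = false) :
    pvB_trim (l ++ [m]) = pvB_trim l := by
  rw [pvB_trim.eq_def]
  simp [h]

theorem pv_main (msgs : List (List (String × String))) (keep_history : Bool) :
    to_user_terminal_history_py msgs keep_history = to_user_terminal_history_py_alt msgs keep_history := by
  induction msgs using List.reverseRecOn generalizing keep_history with
  | nil =>
    simp [to_user_terminal_history_py, to_user_terminal_history_py_alt,
      PySem.List.pyRange_neg_one_eq_nil (by norm_num : (-1 : Int) ≤ -1), pvA_findLast, pvB_trim.eq_def]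
  | append_singleton l m ih =>
    have hlen : ((l ++ [m]).length : Int) - 1 = (l.length : Int) := by simp
    have hrange : PySem.List.pyRange (((l ++ [m]).length : Int) - 1) (-1) (-1)
        = (l.length : Int) :: PySem.List.pyRange ((l.length : Int) - 1) (-1) (-1) := by
      rw [hlen, PySem.List.pyRange_neg_one_cons (by omega)]
    have hgetm : PySem.List.pyGetD (l ++ [m]) (l.length : Int) ([] : List (String × String)) = m := by
      rw [PySem.List.pyGetD_of_nonneg _ _ (by omega)]
      simp [List.getD]
    by_cases hp : ((PySem.Dict.mk m).get? "role" == some "user") = true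
    · -- last message is a user turn: both keep the whole list
      have hfind : pvA_findLast (l ++ [m])
          (PySem.List.pyRange (((l ++ [m]).length : Int) - 1) (-1) (-1)) = some (l.length : Int) := by
        rw [hrange, pvA_findLast, hgetm, if_pos hp]
      have hslice : PySem.List.slice (l ++ [m]) none (some ((l.length : Int) + 1)) = l ++ [m] := by
        have : ((l.length : Int) + 1) = ((l.length + 1 : Nat) : Int) := by push_cast; ring
        rw [this, PySem.List.slice_to_natCast]
        exact List.take_of_length_le (by simp)
      rw [to_user_terminal_history_py, to_user_terminal_history_py_alt]
      rw [hfind]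
      simp only [hslice, pvB_trim_append_user hp]
      cases keep_history with
      | false => simp [PySem.List.pyGet?_neg_one_append_singleton]
      | true => simp
    · -- trailing non-user turn: both reduce to the same computation on l
      have hp' : ((PySem.Dict.mk m).get? "role" == some "user") = false := by
        simpa using hp
      have hfind : pvA_findLast (l ++ [m])
          (PySem.List.pyRange (((l ++ [m]).length : Int) - 1) (-1) (-1))
          = pvA_findLast l (PySem.List.pyRange ((l.length : Int) - 1) (-1) (-1)) := by
        rw [hrange, pvA_findLast, hgetm, hp', if_neg (by simp)]
        refine pvA_findLast_append (fun i hi => ?_)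
        have := (PySem.List.mem_pyRange_neg_one).1 hi
        omega
      have hA : to_user_terminal_history_py (l ++ [m]) keep_history
          = to_user_terminal_history_py l keep_history := by
        rw [to_user_terminal_history_py, to_user_terminal_history_py, hfind]
        cases hres : pvA_findLast l (PySem.List.pyRange ((l.length : Int) - 1) (-1) (-1)) with
        | none => rfl
        | some idx =>
          have hmem := (PySem.List.mem_pyRange_neg_one).1 (pvA_findLast_mem hres)
          have hslice : PySem.List.slice (l ++ [m]) none (some (idx + 1))
              = PySem.List.slice l none (some (idx + 1)) := by
            rw [PySem.List.slice_to _ (by omega), PySem.List.slice_to _ (by omega)]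
            exact List.take_append_of_le_length (by omega)
          simp only [hslice]
      have hB : to_user_terminal_history_py_alt (l ++ [m]) keep_history
          = to_user_terminal_history_py_alt l keep_history := by
        rw [to_user_terminal_history_py_alt, to_user_terminal_history_py_alt,
          pvB_trim_append_not hp']
      rw [hA, hB]
      exact ih keep_history

-- ===== VERDICT (by name: the statement is the Claim_ definition above) =====
theorem to_user_terminal_history_py_spec : Claim_equal_to_user_terminal_history_py := by
  intro msgs keep_history _
  unfold Spec_to_user_terminal_history_py
  exact pv_main msgs keep_history
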